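-- pv_equiv track=rewrite | github.com/team-t2-capstone/100x-capstone-t2 | backend/app/utils/text_extraction.py | get_text_statistics
-- ===== SOURCE A (Python) =====
-- from typing import Dict, Optional, Tuple
--
-- def get_text_statistics(text: str) -> Dict[str, int]:
--     """Get basic statistics about extracted text"""
--     if not text:
--         return {
--             'characters': 0,
--             'words': 0,
--             'lines': 0,
--             'paragraphs': 0
--         }
--
--     lines = text.split('\n')
--     paragraphs = [line for line in lines if line.strip()]
--     words = text.split()
--
--     return {
--         'characters': len(text),
--         'words': len(words),
--         'lines': len(lines),
--         'paragraphs': len(paragraphs)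
--     }
-- ===== SOURCE B (Python) =====
-- def get_text_statistics(text: str):
--     """Get basic statistics about extracted text"""
--     if not text:
--         return {
--             'characters': 0,
--             'words': 0,
--             'lines': 0,
--             'paragraphs': 0
--         }
--     words = 0
--     newlines = 0
--     paragraphs = 0
--     in_word = False
--     line_has_content = False
--     for ch in text:
--         if ch == '\n':
--             newlines += 1
--             if line_has_content:
--                 paragraphs += 1
--             line_has_content = False
--             in_word = False
--         elif ch.isspace():
--             in_word = False
--         else:
--             if not in_word:
--                 words += 1
--             in_word = True
--             line_has_content = True
--     if line_has_content:
--         paragraphs += 1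
--     return {
--         'characters': len(text),
--         'words': words,
--         'lines': newlines + 1,
--         'paragraphs': paragraphs
--     }
-- ===== Notes on version B (the rewrite author's own statement) =====
-- stated objective: alternative
-- what changed: Replaced the three separate split/strip passes that build intermediate lists (split('\n'), per-line strip, split()) by a single forward character scan maintaining word/newline/paragraph counters and two state flags.
import Mathlib
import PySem

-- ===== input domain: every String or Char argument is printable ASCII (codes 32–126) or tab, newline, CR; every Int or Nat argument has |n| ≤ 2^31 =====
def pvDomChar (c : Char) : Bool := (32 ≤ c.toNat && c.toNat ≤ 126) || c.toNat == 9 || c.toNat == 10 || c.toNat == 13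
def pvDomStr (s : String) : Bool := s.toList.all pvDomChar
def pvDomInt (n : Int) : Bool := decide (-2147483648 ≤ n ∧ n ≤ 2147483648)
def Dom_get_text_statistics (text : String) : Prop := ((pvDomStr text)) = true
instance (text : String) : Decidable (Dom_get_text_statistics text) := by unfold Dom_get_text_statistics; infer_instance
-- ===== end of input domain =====

-- B replaces A's three split/strip passes by one forward character scan with counters (alternative decomposition, same O(n) cost).

-- ===== PORT A =====
def get_text_statistics (text : String) : List (String × Int) :=
  if text = "" then
    [("characters", 0), ("words", 0), ("lines", 0), ("paragraphs", 0)]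
  else
    match PySem.Str.split? text "\n" with
    | none => []   -- unreachable: the separator "\n" is nonempty
    | some lines =>
      let paragraphs := lines.filter (fun line => !(PySem.Str.strip line == ""))
      let words := PySem.Str.split₀ text
      [("characters", PySem.Str.len text),
       ("words", (words.length : Int)),
       ("lines", (lines.length : Int)),
       ("paragraphs", (paragraphs.length : Int))]

-- ===== PORT B =====
-- one step of B's scan: state = (words, newlines, paragraphs, in_word, line_has_content)
def pvStepB (st : Int × Int × Int × Bool × Bool) (c : Char) : Int × Int × Int × Bool × Bool :=
  match st with
  | (w, nl, p, inw, lh) =>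
    if c = '\n' then (w, nl + 1, p + (if lh then 1 else 0), false, false)
    else if PySem.Chars.isspace c then (w, nl, p, false, lh)
    else ((if inw then w else w + 1), nl, p, true, true)

def get_text_statistics_alt (text : String) : List (String × Int) :=
  if text = "" then
    [("characters", 0), ("words", 0), ("lines", 0), ("paragraphs", 0)]
  else
    match text.toList.foldl pvStepB (0, 0, 0, false, false) with
    | (w, nl, p, _, lh) =>
      [("characters", PySem.Str.len text),
       ("words", w),
       ("lines", nl + 1),
       ("paragraphs", p + (if lh then 1 else 0))]

-- ===== PRECONDITION & SPEC =====
def Spec_get_text_statistics (text : String) (out : List (String × Int)) : Prop := out = get_text_statistics_alt text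
instance (text : String) (out : List (String × Int)) : Decidable (Spec_get_text_statistics text out) := by unfold Spec_get_text_statistics; infer_instance

-- ===== CLAIM (what is proved, stated in full; the proofs are below) =====
def Claim_equal_get_text_statistics : Prop := ∀ (text : String), Dom_get_text_statistics text → Spec_get_text_statistics text (get_text_statistics text)

-- ===== LEMMAS AND PROOFS =====

-- spec functions for the scan's components (over the remaining suffix, from a given flag)
def pvN : List Char → Nat
  | [] => 0
  | c :: r => (if c = '\n' then 1 else 0) + pvN r

def pvWds : List Char → Bool → Nat
  | [], _ => 0
  | c :: r, inw => if PySem.Chars.isspace c then pvWds r false else (if inw then 0 else 1) + pvWds r true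

def pvInW : List Char → Bool → Bool
  | [], i => i
  | c :: r, _ => pvInW r (!PySem.Chars.isspace c)

def pvLH : List Char → Bool → Bool
  | [], l => l
  | c :: r, l => pvLH r (if c = '\n' then false else if PySem.Chars.isspace c then l else true)

def pvP : List Char → Bool → Nat
  | [], _ => 0
  | c :: r, l =>
    if c = '\n' then (if l then 1 else 0) + pvP r false
    else pvP r (if PySem.Chars.isspace c then l else true)

def pvF : List Char → Bool := fun line => !(line.all PySem.Chars.isspace)

lemma pv_foldB (s : List Char) : ∀ (w nl p : Int) (inw lh : Bool),
    s.foldl pvStepB (w, nl, p, inw, lh)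
      = (w + (pvWds s inw : Int), nl + (pvN s : Int), p + (pvP s lh : Int), pvInW s inw, pvLH s lh) := by
  induction s with
  | nil => intro w nl p inw lh; simp [pvN, pvWds, pvInW, pvLH, pvP]
  | cons c r ih =>
    intro w nl p inw lh
    by_cases hn : c = '\n'
    · subst hn
      simp only [List.foldl_cons, pvStepB, if_pos rfl, ih, pvN, pvWds, pvInW, pvLH, pvP]
      have : PySem.Chars.isspace '\n' = true := by decide
      cases lh <;> simp [this] <;> omega
    · by_cases hs : PySem.Chars.isspace c = true
      · simp only [List.foldl_cons, pvStepB, if_neg hn, if_pos hs, ih, pvN, pvWds, pvInW, pvLH, pvP]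
        simp [hn, hs] <;> omega
      · simp only [List.foldl_cons, pvStepB, if_neg hn, if_neg hs, ih, pvN, pvWds, pvInW, pvLH, pvP]
        cases inw <;> simp [hn, hs] <;> omega

lemma pv_prefix_newline (l : List Char) (c : Char) (rest : List Char) (h : l = c :: rest) :
    (['\n'].isPrefixOf l) = (c == '\n') := by
  subst h; simp [List.isPrefixOf, eq_comm]

lemma pv_lines_go (fuel : Nat) : ∀ (l cur : List Char) (acc : List (List Char)), l.length < fuel →
    (PySem.Chars.splitOn.go ['\n'] fuel l cur acc).length = acc.length + 1 + pvN l := by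
  induction fuel with
  | zero => intro l cur acc h; omega
  | succ fuel ih =>
    intro l cur acc h
    cases l with
    | nil => rw [PySem.Chars.splitOn.go.eq_def]; simp [pvN]
    | cons c rest =>
      rw [PySem.Chars.splitOn.go.eq_def]
      by_cases hn : c = '\n'
      · subst hn
        simp only [pv_prefix_newline (('\n') :: rest) '\n' rest rfl, beq_self_eq_true, if_pos]
        simp only [List.length_cons] at h
        rw [ih _ [] _ (by simpa using Nat.lt_of_succ_lt_succ h)]
        simp [pvN]; omega
      · have : (['\n'].isPrefixOf (c :: rest)) = false := by
          rw [pv_prefix_newline (c :: rest) c rest rfl]; simp [hn]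
        simp only [this, Bool.false_eq_true, if_neg, ite_false]
        simp only [List.length_cons] at h
        rw [ih _ _ _ (by omega)]
        simp [pvN, hn]

lemma pv_para_go (fuel : Nat) : ∀ (l cur : List Char) (acc : List (List Char)), l.length < fuel →
    ((PySem.Chars.splitOn.go ['\n'] fuel l cur acc).filter pvF).length
      = (acc.filter pvF).length + pvP l (!(cur.all PySem.Chars.isspace))
        + (if pvLH l (!(cur.all PySem.Chars.isspace)) then 1 else 0) := by
  induction fuel with
  | zero => intro l cur acc h; omega
  | succ fuel ih =>
    intro l cur acc h
    cases l with
    | nil =>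
      rw [PySem.Chars.splitOn.go.eq_def]
      rcases Bool.eq_false_or_eq_true (cur.all PySem.Chars.isspace) with hc | hc <;>
        simp [pvP, pvLH, pvF, List.filter_reverse, List.filter_cons, hc] <;> omega
    | cons c rest =>
      rw [PySem.Chars.splitOn.go.eq_def]
      simp only [List.length_cons] at h
      by_cases hn : c = '\n'
      · subst hn
        simp only [pv_prefix_newline (('\n') :: rest) '\n' rest rfl, beq_self_eq_true, if_pos]
        rw [ih _ [] _ (by simpa using Nat.lt_of_succ_lt_succ h)]
        rcases Bool.eq_false_or_eq_true (cur.all PySem.Chars.isspace) with hc | hc <;>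
          simp [pvP, pvLH, pvF, List.filter_cons, hc] <;> omega
      · have hpre : (['\n'].isPrefixOf (c :: rest)) = false := by
          rw [pv_prefix_newline (c :: rest) c rest rfl]; simp [hn]
        simp only [hpre, Bool.false_eq_true, if_neg, ite_false]
        rw [ih _ _ _ (by omega)]
        have hall : (!((c :: cur).all PySem.Chars.isspace))
            = (if PySem.Chars.isspace c then (!(cur.all PySem.Chars.isspace)) else true) := by
          by_cases hs : PySem.Chars.isspace c = true <;> simp [hs]
        simp [pvP, pvLH, hn, hall]

lemma pv_words_go : ∀ (s cur : List Char) (acc : List (List Char)),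
    (PySem.Chars.split₀.go s cur acc).length
      = acc.length + (if cur.isEmpty then 0 else 1) + pvWds s (!cur.isEmpty) := by
  intro s
  induction s with
  | nil =>
    intro cur acc
    rw [PySem.Chars.split₀.go.eq_def]
    by_cases hc : cur.isEmpty <;> simp [hc, pvWds]
  | cons c rest ih =>
    intro cur acc
    rw [PySem.Chars.split₀.go.eq_def]
    by_cases hs : PySem.Chars.isspace c = true
    · by_cases hc : cur.isEmpty = true
      · simp only [hs, hc, if_pos]
        rw [ih]
        simp [pvWds, hs, hc] <;> omega
      · simp only [hs, if_pos, hc, Bool.false_eq_true, ite_false]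
        rw [ih]
        simp [pvWds, hs, hc] <;> omega
    · simp only [hs, Bool.false_eq_true, ite_false]
      rw [ih]
      by_cases hc : cur.isEmpty = true <;> simp [pvWds, hs, hc] <;> omega

lemma pv_strip_nil_iff (l : List Char) :
    (PySem.Chars.strip l = []) ↔ (l.all PySem.Chars.isspace = true) := by
  unfold PySem.Chars.strip PySem.Chars.rstrip PySem.Chars.lstrip
  constructor
  · intro h
    have h2 : List.dropWhile PySem.Chars.isspace (List.dropWhile PySem.Chars.isspace l).reverse = [] := by
      simpa using congrArg List.reverse h
    rw [List.all_eq_true]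
    intro x hx
    rcases List.mem_append.mp (by
        rw [List.takeWhile_append_dropWhile (p := PySem.Chars.isspace) (l := l)]; exact hx :
        x ∈ List.takeWhile PySem.Chars.isspace l ++ List.dropWhile PySem.Chars.isspace l) with h3 | h3
    · exact List.mem_takeWhile_imp h3
    · have : x ∈ (List.dropWhile PySem.Chars.isspace l).reverse := List.mem_reverse.mpr h3
      have := List.dropWhile_eq_nil_iff.mp h2 x this
      exact this
  · intro h
    have : List.dropWhile PySem.Chars.isspace l = [] := by
      rw [List.dropWhile_eq_nil_iff]
      intro x hx; exact List.all_eq_true.mp h x hx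
    simp [this]

lemma pv_filter_pred (l : List Char) :
    (!(PySem.Str.strip (String.ofList l) == "")) = pvF l := by
  unfold pvF
  by_cases h : l.all PySem.Chars.isspace = true
  · have : PySem.Chars.strip l = [] := (pv_strip_nil_iff l).mpr h
    have hs : PySem.Str.strip (String.ofList l) = "" := by
      unfold PySem.Str.strip
      rw [String.toList_ofList, this]
    simp [hs, h]
  · have hne : PySem.Chars.strip l ≠ [] := fun hc => h ((pv_strip_nil_iff l).mp hc)
    have hs : PySem.Str.strip (String.ofList l) ≠ "" := by
      unfold PySem.Str.strip
      intro hc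
      apply hne
      have := congrArg String.toList hc
      simpa using this
    simp [hs, h]

-- ===== VERDICT (by name: the statement is the Claim_ definition above) =====
theorem get_text_statistics_spec : Claim_equal_get_text_statistics := by
  intro text _
  unfold Spec_get_text_statistics get_text_statistics get_text_statistics_alt
  by_cases h : text = ""
  · simp [h]
  · simp only [h, ite_false, if_neg]
    have hsplit : PySem.Str.split? text "\n"
        = some (List.map String.ofList (PySem.Chars.splitOn text.toList ['\n'])) := by
      unfold PySem.Str.split? PySem.Chars.split?
      rfl
    rw [hsplit]
    rw [pv_foldB]
    simp only []
    have hlen : text.toList.length < text.toList.length + 1 := Nat.lt_succ_self _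
    -- lines
    have hlines : (PySem.Chars.splitOn text.toList ['\n']).length = 1 + pvN text.toList := by
      unfold PySem.Chars.splitOn
      rw [pv_lines_go _ _ _ _ hlen]
      simp
    -- paragraphs
    have hpara : ((List.map String.ofList (PySem.Chars.splitOn text.toList ['\n'])).filter
          (fun line => !(PySem.Str.strip line == ""))).length
        = pvP text.toList false + (if pvLH text.toList false then 1 else 0) := by
      rw [List.filter_map, List.length_map]
      have hcong : ∀ xs : List (List Char),
          xs.filter ((fun line => !(PySem.Str.strip line == "")) ∘ String.ofList) = xs.filter pvF := by
        intro xs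
        apply List.filter_congr
        intro x _
        simpa using pv_filter_pred x
      rw [hcong]
      unfold PySem.Chars.splitOn
      rw [pv_para_go _ _ _ _ hlen]
      simp
    -- words
    have hwords : (PySem.Str.split₀ text).length = pvWds text.toList false := by
      unfold PySem.Str.split₀ PySem.Chars.split₀
      rw [List.length_map, pv_words_go]
      simp [pvWds]
    rw [List.length_map, hlines, hpara, hwords]
    by_cases hl : pvLH text.toList false = true <;> simp [hl] <;> omega
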